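-- pv_equiv track=rewrite | github.com/emilyrobinson88/cse5473project | pass_app/app/assets/python/PasswordAnalysis.py | NumberSymbolPlacement
-- ===== SOURCE A (Python) =====
-- def NumberSymbolPlacement(password):
--     firstLetter = -1
--     lastLetter = -1
--     count = 0
--     for i in range(0, len(password)):
--         c = password[i]
--         if c.islower() or c.isupper():
--             if(firstLetter == -1):
--                 firstLetter = i
--             lastLetter = i
--     if 0 <= firstLetter:
--         for i in range(firstLetter, lastLetter):
--             c = password[i]
--             if not (c.islower() or c.isupper()):
--                 count += 1
--     return count
-- ===== SOURCE B (Python) =====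
-- def NumberSymbolPlacement(password):
--     first = -1
--     last = -1
--     letters = 0
--     for i, c in enumerate(password):
--         if c.islower() or c.isupper():
--             if first == -1:
--                 first = i
--             last = i
--             letters += 1
--     if first == -1:
--         return 0
--     return (last - first) - (letters - 1)
-- ===== Notes on version B (the rewrite author's own statement) =====
-- stated objective: simpler
-- what changed: Replaces A's second counting scan over password[first:last] with a single enumerate pass that also tallies letters, returning the closed form (last-first)-(letters-1) since every letter lies in [first,last].
import Mathlib
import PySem

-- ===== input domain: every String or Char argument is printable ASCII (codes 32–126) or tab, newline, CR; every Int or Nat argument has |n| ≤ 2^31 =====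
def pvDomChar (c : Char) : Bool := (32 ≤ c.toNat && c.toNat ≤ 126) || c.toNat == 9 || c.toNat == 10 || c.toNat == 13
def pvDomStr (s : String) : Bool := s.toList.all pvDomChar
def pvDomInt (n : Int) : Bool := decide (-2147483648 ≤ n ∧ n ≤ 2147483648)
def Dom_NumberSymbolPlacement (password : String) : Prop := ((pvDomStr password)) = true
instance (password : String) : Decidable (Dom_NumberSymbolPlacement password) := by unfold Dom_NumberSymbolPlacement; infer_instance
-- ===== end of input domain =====

-- B replaces A's second counting scan by a single pass that also tallies letters and
-- returns the closed form (last - first) - (letters - 1); objective: simpler.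

-- ===== PORT A =====
-- c.islower() or c.isupper()
def pvIsLetter (c : Char) : Bool := PySem.Chars.islower c || PySem.Chars.isupper c

def NumberSymbolPlacement (password : String) : Int :=
  let cs := password.toList
  let st := (PySem.List.pyRange 0 (PySem.Str.len password) 1).foldl
      (fun (st : Int × Int) i =>
        let c := PySem.List.pyGetD cs i ' '
        if pvIsLetter c then (if st.1 == -1 then (i, i) else (st.1, i)) else st)
      (-1, -1)
  if 0 ≤ st.1 then
    (PySem.List.pyRange st.1 st.2 1).foldl
      (fun (count : Int) i =>
        let c := PySem.List.pyGetD cs i ' '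
        if ¬ pvIsLetter c then count + 1 else count) 0
  else 0

-- ===== PORT B =====
def NumberSymbolPlacement_alt (password : String) : Int :=
  let st := (PySem.List.enumerate password.toList 0).foldl
      (fun (st : Int × Int × Int) (p : Int × Char) =>
        if pvIsLetter p.2 then
          ((if st.1 == -1 then p.1 else st.1), p.1, st.2.2 + 1)
        else st)
      (-1, -1, 0)
  if st.1 == -1 then 0 else (st.2.1 - st.1) - (st.2.2 - 1)

-- ===== PRECONDITION & SPEC =====
def Spec_NumberSymbolPlacement (password : String) (out : Int) : Prop := out = NumberSymbolPlacement_alt password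
instance (password : String) (out : Int) : Decidable (Spec_NumberSymbolPlacement password out) := by unfold Spec_NumberSymbolPlacement; infer_instance

-- ===== CLAIM (what is proved, stated in full; the proofs are below) =====
def Claim_equal_NumberSymbolPlacement : Prop := ∀ (password : String), Dom_NumberSymbolPlacement password → Spec_NumberSymbolPlacement password (NumberSymbolPlacement password)


-- ===== LEMMAS AND PROOFS =====

-- the letter test applied through the index
def pvG (cs : List Char) (i : Int) : Bool := pvIsLetter (PySem.List.pyGetD cs i ' ')

-- the (first,last) update of A's first loop (also the first two components of B's loop)
def pvFA (cs : List Char) (st : Int × Int) (i : Int) : Int × Int :=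
  if pvG cs i then (if st.1 == -1 then (i, i) else (st.1, i)) else st

-- the state of A's first loop after scanning indices [0, k)
def pvStA (cs : List Char) (k : Int) : Int × Int :=
  (PySem.List.pyRange 0 k 1).foldl (pvFA cs) (-1, -1)

-- B's fold = A's first-loop fold paired with a letter count
theorem pvFoldB (cs : List Char) (t : List Int) (a b c : Int) :
    t.foldl (fun (st : Int × Int × Int) j =>
        if pvG cs j then ((if st.1 == -1 then j else st.1), j, st.2.2 + 1) else st) (a, b, c)
    = ((t.foldl (pvFA cs) (a, b)).1, (t.foldl (pvFA cs) (a, b)).2,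
        c + (t.countP (pvG cs) : Int)) := by
  induction t generalizing a b c with
  | nil => simp
  | cons x t ih =>
    rw [List.foldl_cons, List.foldl_cons]
    by_cases hx : pvG cs x = true
    · have e1 : pvFA cs (a, b) x = ((if a == -1 then x else a), x) := by
        rw [pvFA, if_pos hx]
        by_cases ha : a = -1 <;> simp [ha]
      rw [if_pos hx, ih, e1, List.countP_cons, hx]
      simp [Prod.ext_iff]
      ring
    · have hx' : pvG cs x = false := by simpa using hx
      have e1 : pvFA cs (a, b) x = (a, b) := by simp [pvFA, hx']
      rw [if_neg hx, ih, e1, List.countP_cons, hx']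
      simp
-- characterization of A's first loop over indices [0, k)
theorem pvStA_char (cs : List Char) (k : Nat) :
    (pvStA cs (k : Int) = (-1, -1) ∧ ∀ i : Int, 0 ≤ i → i < (k : Int) → pvG cs i = false) ∨
    (∃ f la : Int, pvStA cs (k : Int) = (f, la) ∧ 0 ≤ f ∧ f ≤ la ∧ la < (k : Int) ∧
      pvG cs f = true ∧ pvG cs la = true ∧
      (∀ i : Int, 0 ≤ i → i < f → pvG cs i = false) ∧
      (∀ i : Int, la < i → i < (k : Int) → pvG cs i = false)) := by
  induction k with
  | zero =>
    left
    refine ⟨?_, ?_⟩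
    · simp [pvStA, PySem.List.pyRange_one_eq_nil]
    · intro i h1 h2; exfalso; omega
  | succ k ih =>
    have hcast : ((k + 1 : Nat) : Int) = (k : Int) + 1 := by push_cast; ring
    have hstep : pvStA cs ((k : Int) + 1) = pvFA cs (pvStA cs (k : Int)) (k : Int) := by
      unfold pvStA
      rw [PySem.List.pyRange_one_succ_right (Int.natCast_nonneg k), List.foldl_append,
        List.foldl_cons, List.foldl_nil]
    rw [hcast, hstep]
    by_cases hk : pvG cs (k : Int) = true
    · right
      rcases ih with ⟨hnil, hall⟩ | ⟨f, la, heq, h0, hle, hlt, hf, hl, hbelow, habove⟩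
      · rw [hnil]
        have e : pvFA cs (-1, -1) (k : Int) = ((k : Int), (k : Int)) := by simp [pvFA, hk]
        rw [e]
        refine ⟨(k : Int), (k : Int), rfl, Int.natCast_nonneg k, le_refl _, by omega, hk, hk,
          fun i h1 h2 => hall i h1 h2, fun i h1 h2 => by exfalso; omega⟩
      · rw [heq]
        have hb : (f == -1) = false := by simp; omega
        have e : pvFA cs (f, la) (k : Int) = (f, (k : Int)) := by simp [pvFA, hk, hb]
        rw [e]
        refine ⟨f, (k : Int), rfl, h0, by omega, by omega, hf, hk, hbelow, fun i h1 h2 => by exfalso; omega⟩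
    · have hk' : pvG cs (k : Int) = false := by simpa using hk
      have e : ∀ st : Int × Int, pvFA cs st (k : Int) = st := by
        intro st; simp [pvFA, hk']
      rw [e]
      rcases ih with ⟨hnil, hall⟩ | ⟨f, la, heq, h0, hle, hlt, hf, hl, hbelow, habove⟩
      · left
        refine ⟨hnil, fun i h1 h2 => ?_⟩
        by_cases hik : i = (k : Int)
        · subst hik; exact hk'
        · exact hall i h1 (by omega)
      · right
        refine ⟨f, la, heq, h0, hle, by omega, hf, hl, hbelow, fun i h1 h2 => ?_⟩
        by_cases hik : i = (k : Int)
        · subst hik; exact hk'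
        · exact habove i h1 (by omega)

-- countP of a range where the predicate is everywhere false
theorem pvCountP_zero (p : Int → Bool) (a b : Int)
    (h : ∀ i : Int, a ≤ i → i < b → p i = false) :
    (PySem.List.pyRange a b 1).countP p = 0 := by
  apply List.countP_eq_zero.mpr
  intro x hx
  rw [PySem.List.mem_pyRange_one] at hx
  simp [h x hx.1 hx.2]



-- ===== VERDICT (by name: the statement is the Claim_ definition above) =====
theorem NumberSymbolPlacement_spec : Claim_equal_NumberSymbolPlacement := by
  intro password _
  unfold Spec_NumberSymbolPlacement NumberSymbolPlacement_alt
  dsimp only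
  rw [PySem.List.enumerate_eq_map_pyRange password.toList ' ', List.foldl_map]
  show NumberSymbolPlacement password =
    (let st := (PySem.List.pyRange 0 (PySem.List.len password.toList) 1).foldl
        (fun (st : Int × Int × Int) j =>
          if pvG password.toList j then ((if st.1 == -1 then j else st.1), j, st.2.2 + 1) else st)
        ((-1 : Int), (-1 : Int), (0 : Int));
     if st.1 == -1 then 0 else (st.2.1 - st.1) - (st.2.2 - 1))
  dsimp only
  rw [pvFoldB]
  set cs := password.toList with hcs
  have hA : NumberSymbolPlacement password =
      (if 0 ≤ (pvStA cs (PySem.List.len cs)).1 then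
        (PySem.List.pyRange (pvStA cs (PySem.List.len cs)).1 (pvStA cs (PySem.List.len cs)).2 1).foldl
          (fun (count : Int) i => if ¬ pvG cs i = true then count + 1 else count) 0
      else 0) := by
    rfl
  rw [hA]
  have hlen : PySem.List.len cs = ((cs.length : Nat) : Int) := by
    simp [PySem.List.len]
  rw [hlen]
  rw [show List.foldl (pvFA cs) (-1, -1) (PySem.List.pyRange 0 ((cs.length : Nat) : Int) 1)
      = pvStA cs ((cs.length : Nat) : Int) from rfl]
  have hchar := pvStA_char cs cs.length
  rcases hchar with ⟨hnil, _⟩ | ⟨f, la, heq, h0, hle, hlt, hf, hl, hbelow, habove⟩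
  · rw [hnil]
    norm_num
  · rw [heq]
    simp only [] at *
    have hff : (f == -1) = false := by simp; omega
    rw [if_pos (show (0 : Int) ≤ (f, la).1 from h0)]
    have hcnt := PySem.List.foldl_ite_add_one (fun i => ¬ pvG cs i = true)
      (PySem.List.pyRange (f, la).1 (f, la).2 1) 0
    rw [hcnt]
    simp only [hff, Bool.false_eq_true, if_false]
    -- counting facts
    have hlen2 : (PySem.List.pyRange f la 1).length = (la - f).toNat :=
      PySem.List.length_pyRange_one f la
    have hsum := List.length_eq_countP_add_countP (l := PySem.List.pyRange f la 1) (pvG cs)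
    have s1 : PySem.List.pyRange 0 ((cs.length : Nat) : Int) 1
        = PySem.List.pyRange 0 f 1 ++ PySem.List.pyRange f la 1
          ++ PySem.List.pyRange la (la + 1) 1 ++ PySem.List.pyRange (la + 1) ((cs.length : Nat) : Int) 1 := by
      rw [PySem.List.pyRange_one_append 0 f ((cs.length : Nat) : Int) h0 (by omega)]
      rw [PySem.List.pyRange_one_append f la ((cs.length : Nat) : Int) hle (by omega)]
      rw [PySem.List.pyRange_one_append la (la + 1) ((cs.length : Nat) : Int) (by omega) (by omega)]
      simp [List.append_assoc]
    have c1 : (PySem.List.pyRange 0 f 1).countP (pvG cs) = 0 :=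
      pvCountP_zero (pvG cs) 0 f (fun i h1 h2 => hbelow i h1 h2)
    have c2 : (PySem.List.pyRange (la + 1) ((cs.length : Nat) : Int) 1).countP (pvG cs) = 0 :=
      pvCountP_zero (pvG cs) (la + 1) ((cs.length : Nat) : Int) (fun i h1 h2 => habove i (by omega) h2)
    have c3 : (PySem.List.pyRange la (la + 1) 1).countP (pvG cs) = 1 := by
      rw [PySem.List.pyRange_one_singleton]
      simp [hl]
    have htot : (PySem.List.pyRange 0 ((cs.length : Nat) : Int) 1).countP (pvG cs)
        = (PySem.List.pyRange f la 1).countP (pvG cs) + 1 := by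
      rw [s1, List.countP_append, List.countP_append, List.countP_append, c1, c2, c3]
      omega
    rw [htot]
    have hsum' : (la - f).toNat
        = (PySem.List.pyRange f la 1).countP (pvG cs)
          + (PySem.List.pyRange f la 1).countP (fun a => decide (¬ pvG cs a = true)) := by
      rw [← hlen2]
      exact hsum
    omega
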